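-- pv_equiv track=rewrite | github.com/shuvava/python_algorithms | ProbabilisticDataStructures/cardinality/stochastic_averaging.py | left_most_zero
-- ===== SOURCE A (Python) =====
-- def left_most_zero(arr):
--     num = 0
--     for word in arr:
--         mask = 1
--         for i in range(0, 31):
--             if word & mask == 0:
--                 return num
--             num += 1
--             mask = mask << 1
--     return None
-- ===== SOURCE B (Python) =====
-- def left_most_zero(arr):
--     num = 0
--     for word in arr:
--         x = word & 0x7FFFFFFF
--         if x == 0x7FFFFFFF:
--             num += 31
--         else:
--             return num + (x ^ (x + 1)).bit_length() - 1
--     return None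
-- ===== Notes on version B (the rewrite author's own statement) =====
-- stated objective: alternative
-- what changed: The 31-iteration inner bit scan per word is replaced by a closed-form computation: take the word's low 31 bits x, and if x is not all ones the index of the first zero bit is (x ^ (x+1)).bit_length() - 1.
import Mathlib
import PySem

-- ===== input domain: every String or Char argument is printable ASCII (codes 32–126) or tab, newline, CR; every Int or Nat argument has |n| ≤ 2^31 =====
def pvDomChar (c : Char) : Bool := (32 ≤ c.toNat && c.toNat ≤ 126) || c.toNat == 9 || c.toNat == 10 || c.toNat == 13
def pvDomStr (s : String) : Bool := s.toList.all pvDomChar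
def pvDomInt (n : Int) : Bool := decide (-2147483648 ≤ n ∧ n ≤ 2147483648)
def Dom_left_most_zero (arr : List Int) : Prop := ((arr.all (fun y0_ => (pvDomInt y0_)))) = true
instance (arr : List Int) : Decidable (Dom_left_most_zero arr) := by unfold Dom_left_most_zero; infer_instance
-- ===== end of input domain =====

-- B replaces A's 31-step inner bit scan by a closed-form computation per word
-- ((x ^ (x+1)).bit_length() - 1 on the word's low 31 bits); same return value everywhere.

-- ===== PORT A =====
-- inner 'for i in range(0, 31)' loop: fuel counts remaining iterations;
-- returns some num on 'return num', none when the loop runs out.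
def lmzInner (word : Int) (num : Int) (mask : Int) : Nat → Option Int
  | 0 => none
  | fuel + 1 =>
      if PySem.Int.band word mask = 0 then some num
      else lmzInner word (num + 1) (mask <<< (1 : Nat)) fuel

-- outer 'for word in arr' loop, carrying num (none from a word advances num by 31)
def lmzGo (num : Int) : List Int → Option Int
  | [] => none
  | w :: rest =>
      match lmzInner w num 1 31 with
      | some r => some r
      | none => lmzGo (num + 31) rest

def left_most_zero (arr : List Int) : Option Int := lmzGo 0 arr

-- ===== PORT B =====
def lmzAltGo (num : Int) : List Int → Option Int
  | [] => none
  | w :: rest =>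
      let x := PySem.Int.band w 2147483647
      if x = 2147483647 then lmzAltGo (num + 31) rest
      else some (num + (PySem.Int.bitLength (PySem.Int.bxor x (x + 1)) : Int) - 1)

def left_most_zero_alt (arr : List Int) : Option Int := lmzAltGo 0 arr

-- ===== PRECONDITION & SPEC =====
def Spec_left_most_zero (arr : List Int) (out : Option Int) : Prop := out = left_most_zero_alt arr
instance (arr : List Int) (out : Option Int) : Decidable (Spec_left_most_zero arr out) := by unfold Spec_left_most_zero; infer_instance

-- ===== CLAIM (what is proved, stated in full; the proofs are below) =====
def Claim_equal_left_most_zero : Prop := ∀ (arr : List Int), Dom_left_most_zero arr → Spec_left_most_zero arr (left_most_zero arr)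

-- ===== LEMMAS AND PROOFS =====

-- number of trailing one-bits of a natural number
def lz (m : Nat) : Nat :=
  if h : m % 2 = 0 then 0 else lz (m / 2) + 1
decreasing_by omega

-- pure specification of A's inner scan on the word's bit sequence
def lzFind : Nat → Nat → Option Nat
  | 0, _ => none
  | fuel + 1, m => if m.testBit 0 then (lzFind fuel (m / 2)).map (· + 1) else some 0

-- Python's bit k of an arbitrary int (two's complement)
def pbit (w : Int) (k : Nat) : Bool :=
  if 0 ≤ w then w.toNat.testBit k else !(-w - 1).toNat.testBit k

theorem lz_even {m : Nat} (h : m % 2 = 0) : lz m = 0 := by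
  rw [lz]; simp [h]

theorem lz_odd {m : Nat} (h : m % 2 ≠ 0) : lz m = lz (m / 2) + 1 := by
  rw [lz]; simp [h]

-- bits of (2^m - 1 - r) are the complements of r's bits below m
theorem compl_testBit : ∀ (m r k : Nat), r < 2 ^ m →
    (2 ^ m - 1 - r).testBit k = (decide (k < m) && !r.testBit k) := by
  intro m
  induction m with
  | zero => intro r k hr; interval_cases r; simp [Nat.zero_testBit]
  | succ m ih =>
    intro r k hr
    have h2 : 2 ^ (m + 1) = 2 * 2 ^ m := by ring
    cases k with
    | zero =>
      simp only [Nat.testBit_zero]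
      have : (2 ^ (m + 1) - 1 - r) % 2 = 1 - r % 2 := by omega
      simp only [this]
      have hpos : 0 < m + 1 := by omega
      rcases Nat.even_or_odd r with he | ho
      · have : r % 2 = 0 := Nat.even_iff.mp he
        simp [this, hpos]
      · have : r % 2 = 1 := Nat.odd_iff.mp ho
        simp [this, hpos]
    | succ k =>
      have hdiv : (2 ^ (m + 1) - 1 - r) / 2 = 2 ^ m - 1 - r / 2 := by omega
      rw [Nat.testBit_succ, hdiv, ih (r / 2) k (by omega), Nat.testBit_succ]
      have : (k + 1 < m + 1) ↔ (k < m) := by omega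
      simp [this]

-- F1: A's loop test reads Python's bit k of the word
theorem band_two_pow_eq_zero (w : Int) (k : Nat) :
    (PySem.Int.band w ((2 : Int) ^ k) = 0) ↔ pbit w k = false := by
  have hc : ((2 : Int) ^ k) = ((2 ^ k : Nat) : Int) := by push_cast; ring
  have hnn : (0 : Int) ≤ (2 : Int) ^ k := by positivity
  by_cases hw : 0 ≤ w
  · rw [PySem.Int.band_of_nonneg hw hnn]
    rw [hc, Int.toNat_natCast, Nat.and_two_pow]
    unfold pbit
    simp only [hw, if_pos]
    cases h : w.toNat.testBit k <;> simp [h]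
  · unfold PySem.Int.band
    simp only [if_neg hw, if_pos hnn]
    rw [hc, Int.toNat_natCast, Nat.land_comm, Nat.and_two_pow]
    unfold pbit
    simp only [hw, if_neg]
    cases h : (-w - 1).toNat.testBit k <;> simp [h]

-- F2/F3/F4: the value of word & 0x7FFFFFFF
theorem band_mask_eq (w : Int) :
    ∃ n : Nat, PySem.Int.band w 2147483647 = (n : Int) ∧ n < 2 ^ 31 ∧
      ∀ k, k < 31 → n.testBit k = pbit w k := by
  have hM : ((2147483647 : Int)).toNat = 2 ^ 31 - 1 := by decide
  by_cases hw : 0 ≤ w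
  · refine ⟨w.toNat &&& (2 ^ 31 - 1), ?_, ?_, ?_⟩
    · rw [PySem.Int.band_of_nonneg hw (by norm_num), hM]
    · rw [Nat.and_two_pow_sub_one_eq_mod]; exact Nat.mod_lt _ (by norm_num)
    · intro k hk
      rw [Nat.and_two_pow_sub_one_eq_mod, Nat.testBit_mod_two_pow]
      unfold pbit
      simp [hw, hk]
  · refine ⟨2 ^ 31 - 1 - (-w - 1).toNat % 2 ^ 31, ?_, by omega, ?_⟩
    · unfold PySem.Int.band
      simp only [if_neg hw, if_pos (by norm_num : (0:Int) ≤ 2147483647)]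
      rw [hM, Nat.land_comm, Nat.and_two_pow_sub_one_eq_mod]
    · intro k hk
      rw [compl_testBit 31 _ k (Nat.mod_lt _ (by norm_num)), Nat.testBit_mod_two_pow]
      unfold pbit
      simp [hw, hk]

-- invariant of A's inner loop: it is lzFind on the shifted bit word
theorem innerSpec (w : Int) (n : Nat) (hbits : ∀ k, k < 31 → n.testBit k = pbit w k) :
    ∀ (fuel k : Nat) (num : Int), k + fuel = 31 →
      lmzInner w num ((2 : Int) ^ k) fuel = (lzFind fuel (n >>> k)).map (fun j => num + (j : Int)) := by
  intro fuel
  induction fuel with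
  | zero => intro k num _; simp [lmzInner, lzFind]
  | succ fuel ih =>
    intro k num hk
    have hbit : (n >>> k).testBit 0 = pbit w k := by
      rw [Nat.testBit_shiftRight]; exact hbits k (by omega)
    rw [lmzInner, lzFind]
    by_cases hz : PySem.Int.band w ((2 : Int) ^ k) = 0
    · have : pbit w k = false := (band_two_pow_eq_zero w k).mp hz
      rw [if_pos hz, if_neg (by simp [hbit, this])]
      simp
    · have hp : pbit w k = true := by
        rcases Bool.eq_false_or_eq_true (pbit w k) with h | h
        · exact h
        · exact absurd ((band_two_pow_eq_zero w k).mpr h) hz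
      rw [if_neg hz, if_pos (by simp [hbit, hp])]
      have hsh : ((2 : Int) ^ k) <<< (1 : Nat) = (2 : Int) ^ (k + 1) := by
        rw [Int.shiftLeft_eq]; ring
      rw [hsh, ih (k + 1) (num + 1) (by omega)]
      have hhalf : n >>> k / 2 = n >>> (k + 1) := (Nat.shiftRight_succ n k).symm
      rw [hhalf]
      cases lzFind fuel (n >>> (k + 1)) with
      | none => simp
      | some j => simp; ring

-- lzFind finds the trailing-ones count when it is within fuel
theorem lzFind_spec : ∀ (fuel m : Nat),
    lzFind fuel m = if lz m < fuel then some (lz m) else none := by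
  intro fuel
  induction fuel with
  | zero => intro m; simp [lzFind]
  | succ fuel ih =>
    intro m
    rw [lzFind]
    by_cases hm : m % 2 = 0
    · have : m.testBit 0 = false := by simp [Nat.testBit_zero]; omega
      rw [this, lz_even hm]
      simp
    · have : m.testBit 0 = true := by simp [Nat.testBit_zero]; omega
      rw [this, lz_odd hm, ih (m / 2)]
      by_cases h : lz (m / 2) < fuel <;> simp [h]

-- trailing-ones count is < 31 exactly when the low 31 bits are not all ones
theorem lz_lt_iff : ∀ (k n : Nat), n < 2 ^ k → (lz n < k ↔ n ≠ 2 ^ k - 1) := by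
  intro k
  induction k with
  | zero => intro n hn; interval_cases n; simp [lz_even]
  | succ k ih =>
    intro n hn
    have h2 : 2 ^ (k + 1) = 2 * 2 ^ k := by ring
    by_cases hm : n % 2 = 0
    · rw [lz_even hm]
      constructor
      · intro _ he; omega
      · intro _; omega
    · rw [lz_odd hm]
      have hlt : n / 2 < 2 ^ k := by omega
      rw [Nat.succ_lt_succ_iff, ih (n / 2) hlt]
      omega

-- x ^ (x + 1) is the all-ones block covering the trailing ones and the first zero
theorem xor_succ_eq : ∀ n : Nat, n ^^^ (n + 1) = 2 ^ (lz n + 1) - 1 := by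
  intro n
  induction n using Nat.strong_induction_on with
  | _ n ih =>
    by_cases hm : n % 2 = 0
    · rw [lz_even hm]
      apply Nat.eq_of_testBit_eq
      intro i
      have hL : ∀ j, (n ^^^ (n + 1)).testBit (j + 1) =
          ((n / 2).testBit j ^^ ((n + 1) / 2).testBit j) := by
        intro j; rw [Nat.testBit_xor, Nat.testBit_succ, Nat.testBit_succ]
      cases i with
      | zero =>
        rw [Nat.testBit_xor]
        simp only [Nat.testBit_zero]
        have h1 : n % 2 = 0 := hm
        have h2 : (n + 1) % 2 = 1 := by omega
        simp [h1, h2]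
      | succ i =>
        rw [hL i]
        have hh : (n + 1) / 2 = n / 2 := by omega
        rw [hh]
        have : (2 ^ (0 + 1) - 1 : Nat) = 1 := by norm_num
        rw [this, Nat.testBit_succ]
        norm_num
    · have hpos : 0 < n := by omega
      rw [lz_odd hm]
      have ihh := ih (n / 2) (by omega)
      apply Nat.eq_of_testBit_eq
      intro i
      have hL : ∀ j, (n ^^^ (n + 1)).testBit (j + 1) =
          ((n / 2).testBit j ^^ ((n + 1) / 2).testBit j) := by
        intro j; rw [Nat.testBit_xor, Nat.testBit_succ, Nat.testBit_succ]
      have hp : (0:Nat) < 2 ^ (lz (n / 2) + 1) := Nat.two_pow_pos _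
      have hdbl : 2 ^ (lz (n / 2) + 1 + 1) = 2 * 2 ^ (lz (n / 2) + 1) := by ring
      cases i with
      | zero =>
        rw [Nat.testBit_xor]
        simp only [Nat.testBit_zero]
        have h1 : n % 2 = 1 := by omega
        have h2 : (n + 1) % 2 = 0 := by omega
        have h3 : (2 ^ (lz (n / 2) + 1 + 1) - 1) % 2 = 1 := by omega
        simp [h1, h2, h3]
      | succ i =>
        rw [hL i]
        have hh : (n + 1) / 2 = n / 2 + 1 := by omega
        rw [hh, ← Nat.testBit_xor, ihh]
        have hhalf : (2 ^ (lz (n / 2) + 1 + 1) - 1).testBit (i + 1)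
            = (2 ^ (lz (n / 2) + 1) - 1).testBit i := by
          rw [Nat.testBit_two_pow_sub_one, Nat.testBit_two_pow_sub_one]
          have : (i + 1 < lz (n / 2) + 1 + 1) ↔ (i < lz (n / 2) + 1) := by omega
          simp [this]
        rw [hhalf]

-- Python's bit_length of an all-ones block
theorem bitLength_pow_sub_one : ∀ k : Nat, PySem.Int.bitLength ((2 ^ k - 1 : Nat) : Int) = k := by
  intro k
  induction k with
  | zero => simp [PySem.Int.bitLength_zero]
  | succ k ih =>
    have hp : (0:Nat) < 2 ^ k := Nat.two_pow_pos _
    have hpos : 0 < 2 ^ (k + 1) - 1 := by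
      have : 2 ^ (k + 1) = 2 * 2 ^ k := by ring
      omega
    rw [PySem.Int.bitLength_natCast hpos]
    have : (2 ^ (k + 1) - 1) / 2 = 2 ^ k - 1 := by
      have : 2 ^ (k + 1) = 2 * 2 ^ k := by ring
      omega
    rw [this, ih]

-- per-word equivalence assembled into the outer loops
theorem go_eq : ∀ (arr : List Int) (num : Int), lmzGo num arr = lmzAltGo num arr := by
  intro arr
  induction arr with
  | nil => intro num; rfl
  | cons w rest ih =>
    intro num
    obtain ⟨n, hval, hlt, hbits⟩ := band_mask_eq w
    have hinner : lmzInner w num 1 31 =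
        (lzFind 31 n).map (fun j => num + (j : Int)) := by
      have := innerSpec w n hbits 31 0 num (by omega)
      simpa using this
    have hfind := lzFind_spec 31 n
    have hiff := lz_lt_iff 31 n hlt
    rw [lmzGo, lmzAltGo, hinner, hfind]
    by_cases hall : n = 2 ^ 31 - 1
    · have hcond : PySem.Int.band w 2147483647 = 2147483647 := by
        rw [hval, hall]; norm_num
      rw [if_neg (by omega), if_pos hcond]
      simpa using ih (num + 31)
    · have hlz : lz n < 31 := hiff.mpr hall
      have hcond : PySem.Int.band w 2147483647 ≠ 2147483647 := by
        rw [hval]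
        intro hc
        apply hall
        have : (n : Int) = ((2 ^ 31 - 1 : Nat) : Int) := by rw [hc]; norm_num
        exact_mod_cast this
      rw [if_pos hlz, if_neg hcond]
      show (some (num + (↑(lz n) : Int))) = _
      rw [hval]
      have hx : (n : Int) + 1 = ((n + 1 : Nat) : Int) := by push_cast; ring
      rw [hx, PySem.Int.bxor_natCast, xor_succ_eq n, bitLength_pow_sub_one]
      push_cast
      ring_nf

-- ===== VERDICT (by name: the statement is the Claim_ definition above) =====
theorem left_most_zero_spec : Claim_equal_left_most_zero := by
  intro arr _
  unfold Spec_left_most_zero left_most_zero left_most_zero_alt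
  exact go_eq arr 0
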